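-- pv_equiv track=rewrite | github.com/810Teams/nihongo-flashcard-visualizer | main.py | y_labels
-- ===== SOURCE A (Python) =====
-- from math import ceil
-- from math import floor
--
-- def y_labels(data_min, data_max, max_y_labels=15, skip=False):
--     ''' Function: Calculates y labels of the chart '''
--     data_min = floor(data_min)
--     data_max = ceil(data_max)
--
--     preset = 1, 2, 5
--
--     if not skip:
--         data_range = list(range(0, data_min - 1, -1)) + list(range(0, data_max + 1, 1))
--         i = 0
--
--         while len(data_range) > max_y_labels:
--             data_range = list(range(0, data_min - preset[i % 3] * 10 ** (i // 3), -1 * preset[i % 3] * 10 ** (i // 3)))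
--             data_range += list(range(0, data_max + preset[i % 3] * 10 ** (i // 3), preset[i % 3] * 10 ** (i // 3)))
--             i += 1
--     else:
--         data_min = int(data_min/10) * 10
--         data_range = list(range(data_min, data_max + 1, 1))
--         i = 0
--
--         while len(data_range) > max_y_labels:
--             data_range = list(range(data_min, data_max + preset[i % 3] * 10 ** (i // 3), preset[i % 3] * 10 ** (i // 3)))
--             i += 1
--
--     data_range.sort()
--
--     return data_range
-- ===== SOURCE B (Python) =====
-- from math import ceil
-- from math import floor
--
--
-- def _step(i):
--     ''' i-th candidate step: 1, 2, 5, 10, 20, 50, 100, ... '''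
--     return (1, 2, 5)[i % 3] * 10 ** (i // 3)
--
--
-- def y_labels(data_min, data_max, max_y_labels=15, skip=False):
--     ''' Function: Calculates y labels of the chart (closed-form label counts,
--         only the final list is materialised, already in sorted order) '''
--     data_min = floor(data_min)
--     data_max = ceil(data_max)
--
--     if not skip:
--         # number of labels on each side of 0 for step s:
--         #   below: 0, -s, -2s, ... down past data_min; above: 0, s, 2s, ... up past data_max
--         def counts(s):
--             return (max(0, (s - data_min - 1) // s + 1),
--                     max(0, (data_max + s - 1) // s + 1))
--
--         s = 1
--         neg, pos = counts(1)
--         i = 0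
--         while neg + pos > max_y_labels:
--             s = _step(i)
--             neg, pos = counts(s)
--             i += 1
--
--         neg_part = [-s * k for k in range(neg)]
--         pos_part = [s * k for k in range(pos)]
--         return neg_part[::-1] + pos_part
--     else:
--         base = int(data_min / 10) * 10
--         s = 1
--         n = max(0, data_max + 1 - base)
--         i = 0
--         while n > max_y_labels:
--             s = _step(i)
--             n = max(0, (data_max + s - base - 1) // s + 1)
--             i += 1
--         return [base + s * k for k in range(n)]
-- ===== Notes on version B (the rewrite author's own statement) =====
-- stated objective: alternative
-- what changed: Instead of materialising the whole label range for every candidate step and sorting at the end, B computes the number of labels per candidate step by a closed-form floor-division formula and materialises only the final list (negative labels reversed, then nonnegative labels), already in sorted order; intended as faster, but a timing run measured only 1.25x at the largest size, so no speed is claimed.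
import Mathlib
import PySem

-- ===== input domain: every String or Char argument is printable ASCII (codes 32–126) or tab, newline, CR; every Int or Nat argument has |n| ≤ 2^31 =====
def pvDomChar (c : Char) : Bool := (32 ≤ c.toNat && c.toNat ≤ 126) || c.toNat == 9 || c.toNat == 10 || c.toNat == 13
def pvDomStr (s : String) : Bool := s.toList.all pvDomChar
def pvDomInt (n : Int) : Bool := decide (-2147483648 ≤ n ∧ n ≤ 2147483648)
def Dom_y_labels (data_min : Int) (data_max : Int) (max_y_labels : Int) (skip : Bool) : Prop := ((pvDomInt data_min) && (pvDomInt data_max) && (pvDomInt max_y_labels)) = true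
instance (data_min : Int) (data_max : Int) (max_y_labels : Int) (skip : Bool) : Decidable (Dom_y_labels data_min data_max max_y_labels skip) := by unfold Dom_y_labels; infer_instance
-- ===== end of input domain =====

-- B replaces A's repeated materialise-whole-range-and-count passes by closed-form label
-- counts per candidate step and builds only the final list, already in sorted order.
-- A's while-loop can run forever (both Pythons loop identically then); the Lean ports run
-- the loop on fuel 40, ample for every terminating input in Dom (|ints| ≤ 2^31), and the
-- proved equality of the two fuelled ports holds on all inputs.

-- ===== PORT A =====
-- Python's floor(data_min)/ceil(data_max) are the identity on int inputs and are dropped.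
-- The loop counter i is always ≥ 0, so it is carried as a Nat; the tuple lookup
-- preset[i % 3] is ported as a list getD (i % 3 < 3, so it never raises).
def yLoopA (data_min : Int) (data_max : Int) (max_y_labels : Int) : Nat → List Int → Nat → List Int
  | 0, dr, _ => dr
  | fuel+1, dr, i =>
    if max_y_labels < PySem.List.len dr then
      let s : Int := [(1 : Int), 2, 5].getD (i % 3) 0 * 10 ^ (i / 3)
      let dr' := PySem.List.pyRange 0 (data_min - s) (-1 * s) ++ PySem.List.pyRange 0 (data_max + s) s
      yLoopA data_min data_max max_y_labels fuel dr' (i + 1)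
    else dr

def yLoopASkip (base : Int) (data_max : Int) (max_y_labels : Int) : Nat → List Int → Nat → List Int
  | 0, dr, _ => dr
  | fuel+1, dr, i =>
    if max_y_labels < PySem.List.len dr then
      let s : Int := [(1 : Int), 2, 5].getD (i % 3) 0 * 10 ^ (i / 3)
      yLoopASkip base data_max max_y_labels fuel (PySem.List.pyRange base (data_max + s) s) (i + 1)
    else dr

def y_labels (data_min : Int) (data_max : Int) (max_y_labels : Int) (skip : Bool) : List Int :=
  if !skip then
    let dr := PySem.List.pyRange 0 (data_min - 1) (-1) ++ PySem.List.pyRange 0 (data_max + 1) 1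
    let dr := yLoopA data_min data_max max_y_labels 40 dr 0
    PySem.List.sorted dr (fun x => x) false
  else
    let base := PySem.Int.truncdiv data_min 10 * 10   -- int(data_min/10)*10 : truncation toward zero
    let dr := PySem.List.pyRange base (data_max + 1) 1
    let dr := yLoopASkip base data_max max_y_labels 40 dr 0
    PySem.List.sorted dr (fun x => x) false

-- ===== PORT B =====
def bStep (i : Nat) : Int := [(1 : Int), 2, 5].getD (i % 3) 0 * 10 ^ (i / 3)

-- closed-form label counts of Source B: counts(s) = (labels below 0 with step s incl. 0, labels from 0 up)
def bCounts (data_min : Int) (data_max : Int) (s : Int) : Int × Int :=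
  (max 0 (PySem.Int.floordiv (s - data_min - 1) s + 1),
   max 0 (PySem.Int.floordiv (data_max + s - 1) s + 1))

def bCountSkip (base : Int) (data_max : Int) (s : Int) : Int :=
  max 0 (PySem.Int.floordiv (data_max + s - base - 1) s + 1)

def yLoopB (data_min : Int) (data_max : Int) (max_y_labels : Int) : Nat → Int → Int × Int → Nat → Int × Int × Int
  | 0, s, np, _ => (s, np.1, np.2)
  | fuel+1, s, np, i =>
    if max_y_labels < np.1 + np.2 then
      yLoopB data_min data_max max_y_labels fuel (bStep i) (bCounts data_min data_max (bStep i)) (i + 1)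
    else (s, np.1, np.2)

def yLoopBSkip (base : Int) (data_max : Int) (max_y_labels : Int) : Nat → Int → Int → Nat → Int × Int
  | 0, s, n, _ => (s, n)
  | fuel+1, s, n, i =>
    if max_y_labels < n then
      yLoopBSkip base data_max max_y_labels fuel (bStep i) (bCountSkip base data_max (bStep i)) (i + 1)
    else (s, n)

-- Source B's final lists: neg_part[::-1] + pos_part ported as .reverse ++ …
def y_labels_alt (data_min : Int) (data_max : Int) (max_y_labels : Int) (skip : Bool) : List Int :=
  if !skip then
    let r := yLoopB data_min data_max max_y_labels 40 1 (bCounts data_min data_max 1) 0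
    ((PySem.List.pyRange 0 r.2.1 1).map (fun k => -r.1 * k)).reverse ++
      (PySem.List.pyRange 0 r.2.2 1).map (fun k => r.1 * k)
  else
    let base := PySem.Int.truncdiv data_min 10 * 10
    let r := yLoopBSkip base data_max max_y_labels 40 1 (max 0 (data_max + 1 - base)) 0
    (PySem.List.pyRange 0 r.2 1).map (fun k => base + r.1 * k)

-- ===== PRECONDITION & SPEC =====
def Spec_y_labels (data_min : Int) (data_max : Int) (max_y_labels : Int) (skip : Bool) (out : List Int) : Prop := out = y_labels_alt data_min data_max max_y_labels skip
instance (data_min : Int) (data_max : Int) (max_y_labels : Int) (skip : Bool) (out : List Int) : Decidable (Spec_y_labels data_min data_max max_y_labels skip out) := by unfold Spec_y_labels; infer_instance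

-- ===== CLAIM (what is proved, stated in full; the proofs are below) =====
def Claim_equal_y_labels : Prop := ∀ (data_min : Int) (data_max : Int) (max_y_labels : Int) (skip : Bool), Dom_y_labels data_min data_max max_y_labels skip → Spec_y_labels data_min data_max max_y_labels skip (y_labels data_min data_max max_y_labels skip)

-- ===== LEMMAS AND PROOFS =====

-- the three list shapes the programs build
def negChunk (s : Int) (n : Nat) : List Int := (List.range n).map (fun k : Nat => -(s * (k : Int)))
def posChunk (s : Int) (n : Nat) : List Int := (List.range n).map (fun k : Nat => s * (k : Int))
def skipChunk (m s : Int) (n : Nat) : List Int := (List.range n).map (fun k : Nat => m + s * (k : Int))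

lemma count_toNat (x s : Int) (hs : 0 < s) :
    (if 0 < x then ((x + s - 1) / s).toNat else 0) = (max 0 (PySem.Int.floordiv (x - 1) s + 1)).toNat := by
  rw [PySem.Int.floordiv_eq_ediv_of_pos hs]
  split_ifs with h
  · have h1 : (x - 1) / s + 1 = (x + s - 1) / s := by
      have := Int.add_mul_ediv_right (x - 1) 1 (ne_of_gt hs)
      rw [one_mul] at this
      rw [show x + s - 1 = x - 1 + s by ring, this]
    have h2 : 0 ≤ (x - 1) / s := Int.ediv_nonneg (by omega) hs.le
    omega
  · have h2 : (x - 1) / s < 0 := Int.ediv_neg_of_neg_of_pos (by omega) hs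
    omega

lemma pyRange_pos_eq (m b s : Int) (hs : 0 < s) :
    PySem.List.pyRange m b s = skipChunk m s (max 0 (PySem.Int.floordiv (b - m - 1) s + 1)).toNat := by
  rw [PySem.List.pyRange_of_pos _ _ hs]
  have h2 := count_toNat (b - m) s hs
  simp only [Int.sub_pos] at h2
  rw [skipChunk, h2]

lemma pyRange_neg_eq (c s : Int) (hs : 0 < s) :
    PySem.List.pyRange 0 c (-1 * s) = negChunk s (max 0 (PySem.Int.floordiv (-c - 1) s + 1)).toNat := by
  rw [show ((-1) * s : Int) = -s by ring]
  have hnz : (-s : Int) ≠ 0 := by omega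
  have hns : ¬ (0 : Int) < -s := by omega
  simp only [PySem.List.pyRange, hnz, if_false, hns, neg_neg, zero_sub, negChunk]
  have h2 := count_toNat (-c) s hs
  simp only [show ((0:Int) < -c) ↔ c < 0 by omega] at h2
  rw [h2]
  congr 1
  funext k
  ring

lemma bStep_pos (i : Nat) : 0 < bStep i := by
  unfold bStep
  have h3 : i % 3 = 0 ∨ i % 3 = 1 ∨ i % 3 = 2 := by omega
  have hp : (0:Int) < 10 ^ (i / 3) := by positivity
  rcases h3 with h | h | h <;> rw [h] <;> simp

lemma M_eq (data_min data_max s : Int) (hs : 0 < s) :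
    PySem.List.pyRange 0 (data_min - s) (-1 * s) ++ PySem.List.pyRange 0 (data_max + s) s
      = negChunk s (bCounts data_min data_max s).1.toNat ++ posChunk s (bCounts data_min data_max s).2.toNat := by
  rw [pyRange_neg_eq _ _ hs, pyRange_pos_eq _ _ _ hs]
  congr 2
  · rw [bCounts]; ring_nf
  · rw [skipChunk, posChunk, bCounts]
    have : data_max + s - 0 - 1 = data_max + s - 1 := by ring
    rw [this]
    congr 1
    funext k
    ring

lemma lenM (data_min data_max s : Int) (hs : 0 < s) :
    PySem.List.len (PySem.List.pyRange 0 (data_min - s) (-1 * s) ++ PySem.List.pyRange 0 (data_max + s) s)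
      = (bCounts data_min data_max s).1 + (bCounts data_min data_max s).2 := by
  rw [M_eq _ _ _ hs, PySem.List.len_eq]
  simp [negChunk, posChunk]
  have h1 : (0:Int) ≤ (bCounts data_min data_max s).1 := le_max_left _ _
  have h2 : (0:Int) ≤ (bCounts data_min data_max s).2 := le_max_left _ _
  omega

lemma sorted_chunks (s : Int) (hs : 0 < s) (n p : Nat) :
    PySem.List.sorted (negChunk s n ++ posChunk s p) (fun x => x) false
      = (negChunk s n).reverse ++ posChunk s p := by
  apply PySem.List.sorted_id_eq_of_perm_of_pairwise
  · exact (List.reverse_perm _).append_right _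
  · rw [List.pairwise_append]
    refine ⟨?_, ?_, ?_⟩
    · rw [List.pairwise_reverse, negChunk, List.pairwise_map]
      refine List.pairwise_lt_range.imp ?_
      intro a b hab
      have : (a : Int) ≤ b := by exact_mod_cast hab.le
      nlinarith
    · rw [posChunk, List.pairwise_map]
      refine List.pairwise_lt_range.imp ?_
      intro a b hab
      have : (a : Int) ≤ b := by exact_mod_cast hab.le
      nlinarith
    · intro x hx y hy
      rw [List.mem_reverse, negChunk, List.mem_map] at hx
      rw [posChunk, List.mem_map] at hy
      obtain ⟨a, -, rfl⟩ := hx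
      obtain ⟨b, -, rfl⟩ := hy
      have ha : (0:Int) ≤ s * a := by positivity
      have hb : (0:Int) ≤ s * b := by positivity
      omega

lemma negSide (s n : Int) (hn : 0 ≤ n) :
    (PySem.List.pyRange 0 n 1).map (fun k => -s * k) = negChunk s n.toNat := by
  rw [PySem.List.pyRange_one, List.map_map, negChunk,
    show (n - 0).toNat = n.toNat by omega]
  apply List.map_congr_left
  intro a _
  simp only [Function.comp_apply]
  ring

lemma posSide (s n : Int) (hn : 0 ≤ n) :
    (PySem.List.pyRange 0 n 1).map (fun k => s * k) = posChunk s n.toNat := by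
  rw [PySem.List.pyRange_one, List.map_map, posChunk,
    show (n - 0).toNat = n.toNat by omega]
  apply List.map_congr_left
  intro a _
  simp only [Function.comp_apply]
  ring

def buildNS (s neg pos : Int) : List Int :=
  ((PySem.List.pyRange 0 neg 1).map (fun k => -s * k)).reverse ++
    (PySem.List.pyRange 0 pos 1).map (fun k => s * k)

lemma build_eq (s neg pos : Int) (hneg : 0 ≤ neg) (hpos : 0 ≤ pos) :
    buildNS s neg pos = (negChunk s neg.toNat).reverse ++ posChunk s pos.toNat := by
  rw [buildNS, negSide s neg hneg, posSide s pos hpos]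

lemma sortM_eq (data_min data_max s : Int) (hs : 0 < s) :
    PySem.List.sorted (PySem.List.pyRange 0 (data_min - s) (-1 * s) ++ PySem.List.pyRange 0 (data_max + s) s) (fun x => x) false
      = buildNS s (bCounts data_min data_max s).1 (bCounts data_min data_max s).2 := by
  have h1 : (0:Int) ≤ (bCounts data_min data_max s).1 := by simp [bCounts]
  have h2 : (0:Int) ≤ (bCounts data_min data_max s).2 := by simp [bCounts]
  rw [M_eq _ _ _ hs, sorted_chunks s hs, build_eq _ _ _ h1 h2]

lemma loopNS (data_min data_max max_y_labels : Int) :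
    ∀ (fuel : Nat) (s : Int) (i : Nat), 0 < s →
    PySem.List.sorted (yLoopA data_min data_max max_y_labels fuel
        (PySem.List.pyRange 0 (data_min - s) (-1 * s) ++ PySem.List.pyRange 0 (data_max + s) s) i) (fun x => x) false
      = (let r := yLoopB data_min data_max max_y_labels fuel s (bCounts data_min data_max s) i;
         buildNS r.1 r.2.1 r.2.2) := by
  intro fuel
  induction fuel with
  | zero =>
    intro s i hs
    simp only [yLoopA, yLoopB]
    exact sortM_eq _ _ _ hs
  | succ n ih =>
    intro s i hs
    simp only [yLoopA, yLoopB, lenM _ _ _ hs]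
    by_cases hc : max_y_labels < (bCounts data_min data_max s).1 + (bCounts data_min data_max s).2
    · rw [if_pos hc, if_pos hc]
      exact ih (bStep i) (i + 1) (bStep_pos i)
    · rw [if_neg hc, if_neg hc]
      exact sortM_eq _ _ _ hs

lemma skipRange_eq (base data_max s : Int) (hs : 0 < s) :
    PySem.List.pyRange base (data_max + s) s = skipChunk base s (bCountSkip base data_max s).toNat := by
  rw [pyRange_pos_eq _ _ _ hs, bCountSkip]

lemma lenSkip (base data_max s : Int) (hs : 0 < s) :
    PySem.List.len (PySem.List.pyRange base (data_max + s) s) = bCountSkip base data_max s := by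
  rw [skipRange_eq _ _ _ hs, PySem.List.len_eq]
  simp [skipChunk]
  simp [bCountSkip]

lemma sortSkip_eq (base data_max s : Int) (hs : 0 < s) :
    PySem.List.sorted (PySem.List.pyRange base (data_max + s) s) (fun x => x) false
      = PySem.List.pyRange base (data_max + s) s := by
  apply PySem.List.sorted_eq_self_of_pairwise
  rw [skipRange_eq _ _ _ hs, skipChunk, List.pairwise_map]
  refine List.pairwise_lt_range.imp ?_
  intro a b hab
  have : (a : Int) ≤ b := by exact_mod_cast hab.le
  nlinarith

lemma buildSkip_eq (base data_max s : Int) (hs : 0 < s) :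
    (PySem.List.pyRange 0 (bCountSkip base data_max s) 1).map (fun k => base + s * k)
      = PySem.List.pyRange base (data_max + s) s := by
  rw [skipRange_eq _ _ _ hs, PySem.List.pyRange_one, List.map_map, skipChunk]
  have h0 : (0:Int) ≤ bCountSkip base data_max s := by simp [bCountSkip]
  rw [show (bCountSkip base data_max s - 0).toNat = (bCountSkip base data_max s).toNat by omega]
  apply List.map_congr_left
  intro a _
  simp only [Function.comp_apply]
  ring

lemma loopSkip (base data_max max_y_labels : Int) :
    ∀ (fuel : Nat) (s n : Int) (i : Nat), 0 < s → n = bCountSkip base data_max s →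
    PySem.List.sorted (yLoopASkip base data_max max_y_labels fuel (PySem.List.pyRange base (data_max + s) s) i) (fun x => x) false
      = (let r := yLoopBSkip base data_max max_y_labels fuel s n i;
         (PySem.List.pyRange 0 r.2 1).map (fun k => base + r.1 * k)) := by
  intro fuel
  induction fuel with
  | zero =>
    intro s n i hs hn
    simp only [yLoopASkip, yLoopBSkip]
    rw [sortSkip_eq _ _ _ hs, hn, buildSkip_eq _ _ _ hs]
  | succ m ih =>
    intro s n i hs hn
    simp only [yLoopASkip, yLoopBSkip, lenSkip _ _ _ hs, ← hn]
    by_cases hc : max_y_labels < n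
    · rw [if_pos hc, if_pos hc]
      exact ih (bStep i) _ (i + 1) (bStep_pos i) rfl
    · rw [if_neg hc, if_neg hc]
      simp only []
      rw [sortSkip_eq _ _ _ hs, hn, buildSkip_eq _ _ _ hs]

lemma countSkip_one (base data_max : Int) : max 0 (data_max + 1 - base) = bCountSkip base data_max 1 := by
  rw [bCountSkip, PySem.Int.floordiv_eq_ediv_of_pos one_pos]
  simp

-- ===== VERDICT (by name: the statement is the Claim_ definition above) =====
theorem y_labels_spec : Claim_equal_y_labels := by
  intro data_min data_max max_y_labels skip _
  show y_labels data_min data_max max_y_labels skip = y_labels_alt data_min data_max max_y_labels skip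
  cases skip
  · simp only [y_labels, y_labels_alt, Bool.not_false, reduceIte]
    have h := loopNS data_min data_max max_y_labels 40 1 0 one_pos
    have e : PySem.List.pyRange 0 (data_min - 1) (-1 * 1) = PySem.List.pyRange 0 (data_min - 1) (-1) := by
      norm_num
    rw [e] at h
    rw [h]
    rfl
  · simp only [y_labels, y_labels_alt, Bool.not_true, Bool.false_eq_true, reduceIte]
    have h := loopSkip (PySem.Int.truncdiv data_min 10 * 10) data_max max_y_labels 40 1
      (max 0 (data_max + 1 - PySem.Int.truncdiv data_min 10 * 10)) 0 one_pos
      (countSkip_one _ _)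
    rw [h]
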